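-- pv_equiv track=rewrite | github.com/tonyxxq/2mj | times.py | is_yisesanjiegao
-- ===== SOURCE A (Python) =====
-- def is_yisesanjiegao(data):
--     """
--     一色三节高，比如： 111222333
--     """
--
--     # 去重且长度必须大于等于 3
--     pais = set(data['kezi'].keys())
--     if len(pais) < 3:
--         return False
--
--     for i in range(1, 8):
--         if set([i, i + 1, i + 2]).issubset(pais):
--             return True
--
--     return False
-- ===== SOURCE B (Python) =====
-- def is_yisesanjiegao(data):
--     """
--     一色三节高，比如： 111222333
--     Sort the distinct kezi keys lying in 1..9 and scan once for a run of
--     three consecutive values.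
--     """
--     ks = sorted({k for k in data['kezi'] if 1 <= k <= 9})
--     run = 0
--     prev = None
--     for x in ks:
--         run = run + 1 if prev is not None and x == prev + 1 else 1
--         if run == 3:
--             return True
--         prev = x
--     return False
-- ===== Notes on version B (the rewrite author's own statement) =====
-- stated objective: alternative
-- what changed: Replaces A's seven fixed three-element subset probes over range(1,8) by sorting the distinct keys restricted to 1..9 and detecting a run of three consecutive values in one linear scan.
import Mathlib
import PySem

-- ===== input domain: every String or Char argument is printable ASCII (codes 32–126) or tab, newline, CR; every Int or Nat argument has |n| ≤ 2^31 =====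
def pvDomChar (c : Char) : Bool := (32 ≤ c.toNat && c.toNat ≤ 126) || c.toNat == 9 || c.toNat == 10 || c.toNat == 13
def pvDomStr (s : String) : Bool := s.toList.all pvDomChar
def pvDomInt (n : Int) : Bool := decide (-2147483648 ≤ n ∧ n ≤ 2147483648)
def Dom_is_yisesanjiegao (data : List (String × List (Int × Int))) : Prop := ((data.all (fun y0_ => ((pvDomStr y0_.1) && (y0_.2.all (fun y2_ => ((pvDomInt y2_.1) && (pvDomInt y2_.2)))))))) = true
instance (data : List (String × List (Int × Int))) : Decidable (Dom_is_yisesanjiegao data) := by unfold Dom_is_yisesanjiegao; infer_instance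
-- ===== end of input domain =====

-- B replaces A's seven fixed three-element issubset probes by a sort of the distinct keys
-- restricted to 1..9 followed by one linear scan for a run of three consecutive values
-- (objective: alternative — a different algorithm of similar cost).

-- ===== PORT A =====
def is_yisesanjiegao (data : List (String × List (Int × Int))) : Bool :=
  match (PySem.Dict.mk data).get? "kezi" with
  | none => false
  | some kezi =>
      let pais : PySem.Set Int := PySem.Set.ofList (kezi.map Prod.fst)
      if PySem.Set.len pais < 3 then false
      else
        (PySem.List.pyRange 1 8 1).any
          (fun i => PySem.Set.issubset (PySem.Set.ofList [i, i + 1, i + 2]) pais)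

-- ===== PORT B =====
-- the scan loop of B: previous key, current run length, remaining sorted keys
def pvRunScan : Int → Nat → List Int → Bool
  | _, _, [] => false
  | prev, run, x :: t =>
      let run' : Nat := if x = prev + 1 then run + 1 else 1
      if run' = 3 then true else pvRunScan x run' t

def is_yisesanjiegao_alt (data : List (String × List (Int × Int))) : Bool :=
  match (PySem.Dict.mk data).get? "kezi" with
  | none => false
  | some kezi =>
      let ks : List Int :=
        PySem.List.sorted
          (PySem.Set.ofList ((kezi.map Prod.fst).filter (fun k => decide (1 ≤ k) && decide (k ≤ 9))))
          (fun x => x) false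
      match ks with
      | [] => false
      | p :: t => pvRunScan p 1 t

-- ===== PRECONDITION & SPEC =====
-- A raises KeyError when 'kezi' is not a key of data; exactly those inputs are excluded.
def Pre_is_yisesanjiegao (data : List (String × List (Int × Int))) : Prop :=
  "kezi" ∈ data.map Prod.fst

instance (data : List (String × List (Int × Int))) : Decidable (Pre_is_yisesanjiegao data) := by
  unfold Pre_is_yisesanjiegao; infer_instance

def pvWitness_is_yisesanjiegao : (List (String × List (Int × Int))) :=
  [("kezi", [(1, 1), (2, 1), (3, 1)])]

def Spec_is_yisesanjiegao (data : List (String × List (Int × Int))) (out : Bool) : Prop := out = is_yisesanjiegao_alt data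
instance (data : List (String × List (Int × Int))) (out : Bool) : Decidable (Spec_is_yisesanjiegao data out) := by unfold Spec_is_yisesanjiegao; infer_instance

-- ===== CLAIM (what is proved, stated in full; the proofs are below) =====
def Claim_equal_is_yisesanjiegao : Prop := ∀ (data : List (String × List (Int × Int))), Dom_is_yisesanjiegao data → Pre_is_yisesanjiegao data → Spec_is_yisesanjiegao data (is_yisesanjiegao data)

-- ===== LEMMAS AND PROOFS =====

lemma pvRunScan_cons (prev x : Int) (run : Nat) (t : List Int) :
    pvRunScan prev run (x :: t) =
      (if (if x = prev + 1 then run + 1 else 1) = 3 then true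
       else pvRunScan x (if x = prev + 1 then run + 1 else 1) t) := rfl

def pvTriple (l : List Int) : Prop := ∃ x : Int, x ∈ l ∧ x + 1 ∈ l ∧ x + 2 ∈ l

lemma triple_cons_adj (p : Int) (t' : List Int) (hct' : ∀ y ∈ t', p + 1 < y) :
    pvTriple (p :: (p+1) :: t') ↔ (pvTriple ((p+1) :: t') ∨ p + 2 ∈ t') := by
  unfold pvTriple
  constructor
  · rintro ⟨x, hx, hx1, hx2⟩
    simp only [List.mem_cons] at hx hx1 hx2
    by_cases hxp : x = p
    · subst hxp
      right
      rcases hx2 with h | h | h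
      · omega
      · omega
      · exact h
    · left
      have hxge : p + 1 ≤ x := by
        rcases hx with h | h | h
        · omega
        · omega
        · exact le_of_lt (hct' x h)
      refine ⟨x, ?_, ?_, ?_⟩ <;> simp only [List.mem_cons]
      · rcases hx with h | h | h
        exacts [absurd h hxp, Or.inl h, Or.inr h]
      · rcases hx1 with h | h | h
        exacts [absurd h (by omega), Or.inl h, Or.inr h]
      · rcases hx2 with h | h | h
        exacts [absurd h (by omega), Or.inl h, Or.inr h]
  · rintro (⟨x, hx, hx1, hx2⟩ | h)
    · exact ⟨x, by simp only [List.mem_cons] at hx hx1 hx2 ⊢; tauto⟩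
    · refine ⟨p, ?_, ?_, ?_⟩ <;> simp only [List.mem_cons]
      · simp
      · simp
      · simp [h]

lemma triple_cons_gap (p c : Int) (t' : List Int) (hgap : p + 2 ≤ c) (hct' : ∀ y ∈ t', c < y) :
    pvTriple (p :: c :: t') ↔ pvTriple (c :: t') := by
  unfold pvTriple
  constructor
  · rintro ⟨x, hx, hx1, hx2⟩
    simp only [List.mem_cons] at hx hx1 hx2
    by_cases hxp : x = p
    · subst hxp
      exfalso
      rcases hx1 with h | h | h
      · omega
      · omega
      · exact absurd (hct' _ h) (by omega)
    · have hxge : c ≤ x := by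
        rcases hx with h | h | h
        · omega
        · omega
        · exact le_of_lt (hct' x h)
      refine ⟨x, ?_, ?_, ?_⟩ <;> simp only [List.mem_cons]
      · rcases hx with h | h | h
        exacts [absurd h hxp, Or.inl h, Or.inr h]
      · rcases hx1 with h | h | h
        exacts [absurd h (by omega), Or.inl h, Or.inr h]
      · rcases hx2 with h | h | h
        exacts [absurd h (by omega), Or.inl h, Or.inr h]
  · rintro ⟨x, hx, hx1, hx2⟩
    exact ⟨x, by simp only [List.mem_cons] at hx hx1 hx2 ⊢; tauto⟩

lemma pvRunScan_iff (t : List Int) : ∀ (p : Int) (run : Nat), run = 1 ∨ run = 2 →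
    (p :: t).Pairwise (· < ·) →
    (pvRunScan p run t = true ↔ pvTriple (p :: t) ∨ (run = 2 ∧ p + 1 ∈ t)) := by
  induction t with
  | nil =>
      intro p run _ _
      simp only [pvRunScan, pvTriple, List.mem_cons, List.not_mem_nil]
      constructor
      · intro h; cases h
      · rintro (⟨x, hx, hx1, hx2⟩ | ⟨_, h⟩)
        · simp at hx hx1; omega
        · simp at h
  | cons c t' ih =>
      intro p run hrun hpw
      have hpc : p < c := (List.pairwise_cons.mp hpw).1 c (by simp)
      have hpw' : (c :: t').Pairwise (· < ·) := (List.pairwise_cons.mp hpw).2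
      have hct' : ∀ y ∈ t', c < y := fun y hy => (List.pairwise_cons.mp hpw').1 y hy
      rw [pvRunScan_cons]
      by_cases hc : c = p + 1
      · rw [if_pos hc]
        rcases hrun with h1 | h2
        · subst h1
          rw [if_neg (by decide : ¬ ((1:Nat) + 1 = 3))]
          rw [ih c 2 (Or.inr rfl) hpw']
          subst hc
          rw [triple_cons_adj p t' hct']
          have e : p + 1 + 1 = p + 2 := by ring
          constructor
          · rintro (h | ⟨_, h⟩)
            · exact Or.inl (Or.inl h)
            · exact Or.inl (Or.inr (by rwa [e] at h))
          · rintro ((h | h) | ⟨h2, _⟩)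
            · exact Or.inl h
            · exact Or.inr ⟨rfl, by rwa [e]⟩
            · exact absurd h2 (by decide)
        · subst h2
          rw [if_pos (by decide : ((2:Nat) + 1 = 3))]
          subst hc
          constructor
          · intro _
            exact Or.inr ⟨rfl, List.mem_cons_self ..⟩
          · intro _; rfl
      · rw [if_neg hc]
        rw [if_neg (by decide : ¬ ((1:Nat) = 3))]
        rw [ih c 1 (Or.inl rfl) hpw']
        have hgap : p + 2 ≤ c := by omega
        rw [triple_cons_gap p c t' hgap hct']
        have hnp1 : p + 1 ∉ c :: t' := by
          simp only [List.mem_cons]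
          rintro (h | h)
          · omega
          · exact absurd (hct' _ h) (by omega)
        constructor
        · rintro (h | ⟨h, _⟩)
          · exact Or.inl h
          · cases h
        · rintro (h | ⟨_, h⟩)
          · exact Or.inl h
          · exact absurd h hnp1

-- B, characterised: a consecutive triple among the keys, based at some i in 1..7
lemma alt_iff (K : List Int) :
    (match
        PySem.List.sorted
          (PySem.Set.ofList (K.filter (fun k => decide (1 ≤ k) && decide (k ≤ 9))))
          (fun x => x) false with
      | [] => false
      | p :: t => pvRunScan p 1 t) = true ↔
    (∃ i : Int, 1 ≤ i ∧ i < 8 ∧ i ∈ K ∧ i + 1 ∈ K ∧ i + 2 ∈ K) := by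
  have hmem : ∀ x : Int,
      x ∈ PySem.List.sorted
            (PySem.Set.ofList (K.filter (fun k => decide (1 ≤ k) && decide (k ≤ 9))))
            (fun x => x) false ↔ x ∈ K ∧ 1 ≤ x ∧ x ≤ 9 := by
    intro x
    rw [PySem.List.mem_sorted, PySem.Set.mem_ofList, List.mem_filter]
    simp
  have hpw : (PySem.List.sorted
      (PySem.Set.ofList (K.filter (fun k => decide (1 ≤ k) && decide (k ≤ 9))))
      (fun x => x) false).Pairwise (· < ·) := PySem.List.sorted_ofList_pairwise_lt _
  have htrip : pvTriple (PySem.List.sorted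
        (PySem.Set.ofList (K.filter (fun k => decide (1 ≤ k) && decide (k ≤ 9))))
        (fun x => x) false) ↔
      (∃ i : Int, 1 ≤ i ∧ i < 8 ∧ i ∈ K ∧ i + 1 ∈ K ∧ i + 2 ∈ K) := by
    unfold pvTriple
    constructor
    · rintro ⟨x, hx, hx1, hx2⟩
      rw [hmem] at hx hx1 hx2
      exact ⟨x, by omega, by omega, hx.1, hx1.1, hx2.1⟩
    · rintro ⟨i, h1, h8, hi, hi1, hi2⟩
      exact ⟨i, (hmem i).mpr ⟨hi, by omega, by omega⟩,
        (hmem _).mpr ⟨hi1, by omega, by omega⟩, (hmem _).mpr ⟨hi2, by omega, by omega⟩⟩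
  rw [← htrip]
  cases hcase : PySem.List.sorted
      (PySem.Set.ofList (K.filter (fun k => decide (1 ≤ k) && decide (k ≤ 9))))
      (fun x => x) false with
  | nil =>
      simp only [Bool.false_eq_true, false_iff]
      rintro ⟨x, hx, -, -⟩
      simp at hx
  | cons p t =>
      rw [hcase] at hpw
      exact (pvRunScan_iff t p 1 (Or.inl rfl) hpw).trans
        (by constructor
            · rintro (h | ⟨h, _⟩)
              · exact h
              · exact absurd h (by decide)
            · exact Or.inl)

-- three members with distinct values force length ≥ 3 on a Nodup list
lemma three_le_length {l : List Int} (hnd : l.Nodup) {x : Int}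
    (h0 : x ∈ l) (h1 : x + 1 ∈ l) (h2 : x + 2 ∈ l) : 3 ≤ l.length := by
  have hcard : l.toFinset.card = l.length := List.toFinset_card_of_nodup hnd
  have hsub : ({x, x + 1, x + 2} : Finset Int) ⊆ l.toFinset := by
    intro y hy
    simp only [Finset.mem_insert, Finset.mem_singleton] at hy
    rcases hy with rfl | rfl | rfl <;> simp [h0, h1, h2]
  have h3 : ({x, x + 1, x + 2} : Finset Int).card = 3 := by
    rw [Finset.card_insert_of_notMem (by simp),
        Finset.card_insert_of_notMem (by simp), Finset.card_singleton]
  have := Finset.card_le_card hsub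
  omega

-- ===== VERDICT (by name: the statement is the Claim_ definition above) =====
theorem is_yisesanjiegao_spec : Claim_equal_is_yisesanjiegao := by
  intro data _ hpre
  unfold Pre_is_yisesanjiegao at hpre
  unfold Spec_is_yisesanjiegao
  symm

  cases hget : (PySem.Dict.mk data).get? "kezi" with
  | none =>
      exfalso
      rw [PySem.Dict.get?_eq_none_iff_not_mem_keys] at hget
      exact hget hpre
  | some kezi =>
      have eA : is_yisesanjiegao data =
          (if PySem.Set.len (PySem.Set.ofList (kezi.map Prod.fst)) < 3 then false
           else (PySem.List.pyRange 1 8 1).any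
             (fun i => PySem.Set.issubset (PySem.Set.ofList [i, i + 1, i + 2])
               (PySem.Set.ofList (kezi.map Prod.fst)))) := by
        unfold is_yisesanjiegao; rw [hget]
      have eB : is_yisesanjiegao_alt data =
          (match
              PySem.List.sorted
                (PySem.Set.ofList ((kezi.map Prod.fst).filter
                  (fun k => decide (1 ≤ k) && decide (k ≤ 9))))
                (fun x => x) false with
            | [] => false
            | p :: t => pvRunScan p 1 t) := by
        unfold is_yisesanjiegao_alt; rw [hget]
      rw [eA, eB]
      have hBiff := alt_iff (kezi.map Prod.fst)
      have hAany : ((PySem.List.pyRange 1 8 1).any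
          (fun i => PySem.Set.issubset (PySem.Set.ofList [i, i + 1, i + 2])
            (PySem.Set.ofList (kezi.map Prod.fst))) = true) ↔
          (∃ i : Int, 1 ≤ i ∧ i < 8 ∧ i ∈ kezi.map Prod.fst ∧ i + 1 ∈ kezi.map Prod.fst ∧
            i + 2 ∈ kezi.map Prod.fst) := by
        rw [List.any_eq_true]
        constructor
        · rintro ⟨i, hi, hsub⟩
          rw [PySem.List.mem_pyRange_one] at hi
          rw [PySem.Set.issubset_iff] at hsub
          have h0 := hsub i (by rw [PySem.Set.mem_ofList]; simp)
          have h1 := hsub (i + 1) (by rw [PySem.Set.mem_ofList]; simp)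
          have h2 := hsub (i + 2) (by rw [PySem.Set.mem_ofList]; simp)
          rw [PySem.Set.mem_ofList] at h0 h1 h2
          exact ⟨i, hi.1, hi.2, h0, h1, h2⟩
        · rintro ⟨i, h1, h8, hi, hi1, hi2⟩
          refine ⟨i, by rw [PySem.List.mem_pyRange_one]; omega, ?_⟩
          rw [PySem.Set.issubset_iff]
          intro y hy
          rw [PySem.Set.mem_ofList] at hy ⊢
          simp only [List.mem_cons, List.not_mem_nil, or_false] at hy
          rcases hy with rfl | rfl | rfl <;> assumption
      by_cases hlen : PySem.Set.len (PySem.Set.ofList (kezi.map Prod.fst)) < 3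
      · rw [if_pos hlen]
        cases hB : (match
            PySem.List.sorted
              (PySem.Set.ofList ((kezi.map Prod.fst).filter
                (fun k => decide (1 ≤ k) && decide (k ≤ 9))))
              (fun x => x) false with
          | [] => false
          | p :: t => pvRunScan p 1 t) with
        | false => rfl
        | true =>
            exfalso
            rw [hBiff] at hB
            obtain ⟨i, _, _, hi, hi1, hi2⟩ := hB
            have hnd : (PySem.Set.ofList (kezi.map Prod.fst) : List Int).Nodup :=
              PySem.Set.nodup_ofList _
            have h3 : 3 ≤ (PySem.Set.ofList (kezi.map Prod.fst) : List Int).length :=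
              three_le_length hnd ((PySem.Set.mem_ofList _ _).mpr hi)
                ((PySem.Set.mem_ofList _ _).mpr hi1) ((PySem.Set.mem_ofList _ _).mpr hi2)
            have hlen' : PySem.Set.len (PySem.Set.ofList (kezi.map Prod.fst)) =
                ((PySem.Set.ofList (kezi.map Prod.fst) : List Int).length : Int) := by
              simp [PySem.Set.len]
            omega
      · rw [if_neg hlen]
        rw [Bool.eq_iff_iff, hAany, hBiff]
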